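-- pv_equiv track=rewrite | github.com/XcapeAxis/ML-Quant-Research-OS | quant_mvp/strategy_diagnostics.py | _sort_blockers
-- ===== SOURCE A (Python) =====
-- def _sort_blockers(reasons: list[str]) -> list[str]:
--     priorities = {
--         "drawdown": 0,
--         "leakage": 1,
--         "walk": 2,
--         "coverage": 3,
--         "missing_research_inputs": 4,
--     }
--
--     def _score(reason: str) -> tuple[int, str]:
--         lowered = reason.lower()
--         for key, score in priorities.items():
--             if key in lowered:
--                 return score, lowered
--         return 99, lowered
--
--     return sorted([str(item).strip() for item in reasons if str(item).strip()], key=_score)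
-- ===== SOURCE B (Python) =====
-- def _sort_blockers(reasons: list[str]) -> list[str]:
--     keys = ["drawdown", "leakage", "walk", "coverage", "missing_research_inputs"]
--
--     scored = []
--     for item in reasons:
--         stripped = str(item).strip()
--         if stripped == "":
--             continue
--         lowered = stripped.lower()
--         level = next((i for i, key in enumerate(keys) if key in lowered), 5)
--         scored.append((level, lowered, stripped))
--
--     out = []
--     for level in [0, 1, 2, 3, 4, 5]:
--         bucket = sorted((p for p in scored if p[0] == level), key=lambda p: p[1])
--         out.extend(p[2] for p in bucket)
--     return out
-- ===== Notes on version B (the rewrite author's own statement) =====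
-- stated objective: alternative
-- what changed: Replaces the single comparison sort on a (score, lowered) tuple key by a partition: one pass scores every stripped item once, then the six priority levels are emitted in order, each level's bucket sorted by the precomputed lowercased string.
import Mathlib
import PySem

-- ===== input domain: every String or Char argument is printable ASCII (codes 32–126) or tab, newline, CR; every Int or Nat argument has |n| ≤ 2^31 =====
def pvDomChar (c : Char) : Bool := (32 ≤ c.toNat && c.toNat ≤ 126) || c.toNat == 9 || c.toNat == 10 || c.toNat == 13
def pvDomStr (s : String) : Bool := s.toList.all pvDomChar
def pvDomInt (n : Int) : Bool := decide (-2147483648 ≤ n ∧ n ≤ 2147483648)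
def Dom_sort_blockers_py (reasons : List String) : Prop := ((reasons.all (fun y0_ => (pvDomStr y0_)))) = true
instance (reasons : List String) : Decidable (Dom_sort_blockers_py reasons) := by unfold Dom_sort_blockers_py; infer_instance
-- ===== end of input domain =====

-- B replaces A's single tuple-keyed comparison sort by a one-pass scoring step followed by
-- six priority buckets each sorted on the precomputed lowercased string (objective: alternative).

-- ===== PORT A =====
-- the priorities dict of A, in insertion order
def pvPriorities : PySem.Dict String Int :=
  PySem.Dict.mk
    [("drawdown", 0), ("leakage", 1), ("walk", 2), ("coverage", 3), ("missing_research_inputs", 4)]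

-- the 'for key, score in priorities.items(): if key in lowered: return score' loop of _score
def pvScoreLoop (lowered : String) : List (String × Int) → Int
  | [] => 99
  | (key, score) :: rest =>
      if PySem.Str.isIn key lowered then score else pvScoreLoop lowered rest

def sort_blockers_py (reasons : List String) : List String :=
  PySem.List.sorted2
    ((reasons.filter (fun item => !(PySem.Str.strip item == ""))).map (fun item => PySem.Str.strip item))
    (fun reason => pvScoreLoop (PySem.Str.lower reason) pvPriorities.items)
    (fun reason => PySem.Str.lower reason)

-- ===== PORT B =====
def pvKeysB : List String :=
  ["drawdown", "leakage", "walk", "coverage", "missing_research_inputs"]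

-- 'next((i for i, key in enumerate(keys) if key in lowered), 5)'
def pvLevelLoop (lowered : String) : List (Int × String) → Int
  | [] => 5
  | (i, key) :: rest =>
      if PySem.Str.isIn key lowered then i else pvLevelLoop lowered rest

def sort_blockers_py_alt (reasons : List String) : List String :=
  let scored := reasons.foldl (fun acc item =>
    if !(PySem.Str.strip item == "") then
      acc ++ [(pvLevelLoop (PySem.Str.lower (PySem.Str.strip item)) (PySem.List.enumerate pvKeysB),
               PySem.Str.lower (PySem.Str.strip item), PySem.Str.strip item)]
    else acc) []
  ([0, 1, 2, 3, 4, 5] : List Int).foldl (fun out level =>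
    out ++ (PySem.List.sorted (scored.filter (fun p => p.1 == level)) (fun p => p.2.1) false).map
            (fun p => p.2.2)) []

-- ===== PRECONDITION & SPEC =====
def Spec_sort_blockers_py (reasons : List String) (out : List String) : Prop := out = sort_blockers_py_alt reasons
instance (reasons : List String) (out : List String) : Decidable (Spec_sort_blockers_py reasons out) := by unfold Spec_sort_blockers_py; infer_instance

-- ===== CLAIM (what is proved, stated in full; the proofs are below) =====
def Claim_equal_sort_blockers_py : Prop := ∀ (reasons : List String), Dom_sort_blockers_py reasons → Spec_sort_blockers_py reasons (sort_blockers_py reasons)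

-- ===== LEMMAS AND PROOFS =====

-- the lexicographic 'before' predicate PySem.List.sorted2 uses
def pvLt2 {α : Type} (k1 : α → Int) (k2 : α → String) (a b : α) : Bool :=
  decide (k1 a < k1 b) || (!decide (k1 b < k1 a) && decide (k2 a < k2 b))

theorem pvSorted2_eq {α : Type} (xs : List α) (k1 : α → Int) (k2 : α → String) :
    PySem.List.sorted2 xs k1 k2 false =
      xs.foldl (fun acc x => PySem.List.insertBy (pvLt2 k1 k2) x acc) [] := rfl

theorem pvInsertBy_skip {α : Type} (before : α → α → Bool) (x : α) (A B : List α)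
    (h : ∀ a ∈ A, before x a = false) :
    PySem.List.insertBy before x (A ++ B) = A ++ PySem.List.insertBy before x B := by
  induction A with
  | nil => simp
  | cons a A ih =>
      simp only [List.cons_append, PySem.List.insertBy]
      rw [h a (by simp)]
      simp only [Bool.false_eq_true, if_false]
      rw [ih (fun a ha => h a (by simp [ha]))]

theorem pvInsertBy_stop {α : Type} (before : α → α → Bool) (x : α) (B C : List α)
    (h : ∀ c ∈ C, before x c = true) :
    PySem.List.insertBy before x (B ++ C) = PySem.List.insertBy before x B ++ C := by
  induction B with
  | nil =>
      cases C with
      | nil => simp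
      | cons c C => simp [PySem.List.insertBy, h c (by simp)]
  | cons b B ih =>
      simp only [List.cons_append, PySem.List.insertBy]
      by_cases hb : before x b = true
      · simp [hb]
      · simp only [hb, Bool.false_eq_true, if_false, List.cons_append, ih]

theorem pvInsertBy_congr {α : Type} (before before' : α → α → Bool) (x : α) (l : List α)
    (h : ∀ y ∈ l, before x y = before' x y) :
    PySem.List.insertBy before x l = PySem.List.insertBy before' x l := by
  induction l with
  | nil => rfl
  | cons y l ih =>
      simp only [PySem.List.insertBy]
      rw [h y (by simp), ih (fun z hz => h z (by simp [hz]))]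

theorem pvInsertBy_map {α β : Type} (before : β → β → Bool) (F : α → β) (x : α) (l : List α) :
    PySem.List.insertBy before (F x) (l.map F) =
      (PySem.List.insertBy (fun a b => before (F a) (F b)) x l).map F := by
  induction l with
  | nil => rfl
  | cons y l ih =>
      simp only [List.map_cons, PySem.List.insertBy]
      by_cases hb : before (F x) (F y) = true
      · simp [hb]
      · simp only [hb, Bool.false_eq_true, if_false, List.map_cons, ih]

-- a stable sort of a mapped list is the map of the sort with the composed key
theorem pvSorted_map {α β : Type} (F : α → β) (k : β → String) (l : List α) :
    PySem.List.sorted (l.map F) k false =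
      (PySem.List.sorted l (fun a => k (F a)) false).map F := by
  rw [PySem.List.sorted_eq_foldl_insertBy, PySem.List.sorted_eq_foldl_insertBy]
  induction l using List.reverseRecOn with
  | nil => rfl
  | append_singleton l x ih =>
      simp only [List.map_append, List.map_cons, List.map_nil, List.foldl_append, List.foldl_cons,
        List.foldl_nil, ih]
      exact pvInsertBy_map _ F x _

-- appending one element to a stable sort is one insertion
theorem pvSorted_append_singleton {α : Type} (k : α → String) (l : List α) (x : α) :
    PySem.List.sorted (l ++ [x]) k false =
      PySem.List.insertBy (fun a b => decide (k a < k b)) x (PySem.List.sorted l k false) := by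
  rw [PySem.List.sorted_eq_foldl_insertBy, PySem.List.sorted_eq_foldl_insertBy]
  simp [List.foldl_append]

-- CORE: a stable lexicographic sort is the concatenation, over the increasing list of
-- first-component values, of stable second-component sorts of the fibres.
theorem pvSorted2_partition {α : Type} (k1 : α → Int) (k2 : α → String)
    (vs : List Int) (hvs : vs.Pairwise (· < ·)) :
    ∀ (l : List α), (∀ x ∈ l, k1 x ∈ vs) →
      PySem.List.sorted2 l k1 k2 false =
        vs.flatMap (fun v => PySem.List.sorted (l.filter (fun x => k1 x == v)) k2 false) := by
  intro l
  induction l using List.reverseRecOn with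
  | nil => intro _; simp [pvSorted2_eq, PySem.List.sorted]
  | append_singleton l x ih =>
      intro hmem
      have hx : k1 x ∈ vs := hmem x (by simp)
      obtain ⟨pre, post, hsplit⟩ := List.append_of_mem hx
      have hpp := List.pairwise_append.mp (hsplit ▸ hvs)
      have hpre : ∀ v ∈ pre, v < k1 x := fun v hv => hpp.2.2 v hv (k1 x) (by simp)
      have hpost : ∀ v ∈ post, k1 x < v := fun v hv => (List.pairwise_cons.mp hpp.2.1).1 v hv
      have hIH := ih (fun y hy => hmem y (by simp [hy]))
      have hL : PySem.List.sorted2 (l ++ [x]) k1 k2 false =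
          PySem.List.insertBy (pvLt2 k1 k2) x (PySem.List.sorted2 l k1 k2 false) := by
        rw [pvSorted2_eq, pvSorted2_eq]; simp [List.foldl_append]
      have hfib : ∀ v : Int, ∀ y ∈ PySem.List.sorted (l.filter (fun z => k1 z == v)) k2 false,
          k1 y = v := by
        intro v y hy
        have := (PySem.List.mem_sorted _ _ _ _).mp hy
        simpa using (List.mem_filter.mp this).2
      have hof : ∀ v : Int, v ≠ k1 x →
          (l ++ [x]).filter (fun z => k1 z == v) = l.filter (fun z => k1 z == v) := by
        intro v hv
        have : (k1 x == v) = false := by simpa using fun h => hv h.symm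
        simp [List.filter_append, this]
      have hself : (l ++ [x]).filter (fun z => k1 z == (k1 x)) =
          l.filter (fun z => k1 z == (k1 x)) ++ [x] := by
        simp [List.filter_append]
      rw [hL, hIH, hsplit]
      simp only [List.flatMap_append, List.flatMap_cons]
      rw [show List.flatMap
              (fun v => PySem.List.sorted ((l ++ [x]).filter (fun z => k1 z == v)) k2 false) pre =
            List.flatMap (fun v => PySem.List.sorted (l.filter (fun z => k1 z == v)) k2 false) pre
            from List.flatMap_congr (fun v hv => by rw [hof v (ne_of_lt (hpre v hv))]),
          show List.flatMap
              (fun v => PySem.List.sorted ((l ++ [x]).filter (fun z => k1 z == v)) k2 false) post =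
            List.flatMap (fun v => PySem.List.sorted (l.filter (fun z => k1 z == v)) k2 false) post
            from List.flatMap_congr (fun v hv => by rw [hof v (ne_of_gt (hpost v hv))]),
          hself, pvSorted_append_singleton]
      rw [pvInsertBy_skip (pvLt2 k1 k2) x _ _ ?hA]
      case hA =>
        intro a ha
        obtain ⟨v, hv, hav⟩ := List.mem_flatMap.mp ha
        have hk : k1 a = v := hfib v a hav
        have hlt : v < k1 x := hpre v hv
        simp [pvLt2, hk, hlt, not_lt.mpr hlt.le]
      rw [← List.append_assoc, pvInsertBy_stop (pvLt2 k1 k2) x _ _ ?hC, List.append_assoc]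
      case hC =>
        intro c hc
        obtain ⟨v, hv, hcv⟩ := List.mem_flatMap.mp hc
        have hk : k1 c = v := hfib v c hcv
        simp [pvLt2, hk, hpost v hv]
      rw [pvInsertBy_congr (pvLt2 k1 k2) (fun a b => decide (k2 a < k2 b)) x _
            (fun y hy => by simp [pvLt2, hfib (k1 x) y hy])]

-- the score of A and the level of B, computed on the same lowered string, always form
-- one of these six pairs
theorem pvScoreLevel (low : String) :
    (pvScoreLoop low pvPriorities.items = 0 ∧ pvLevelLoop low (PySem.List.enumerate pvKeysB) = 0) ∨
    (pvScoreLoop low pvPriorities.items = 1 ∧ pvLevelLoop low (PySem.List.enumerate pvKeysB) = 1) ∨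
    (pvScoreLoop low pvPriorities.items = 2 ∧ pvLevelLoop low (PySem.List.enumerate pvKeysB) = 2) ∨
    (pvScoreLoop low pvPriorities.items = 3 ∧ pvLevelLoop low (PySem.List.enumerate pvKeysB) = 3) ∨
    (pvScoreLoop low pvPriorities.items = 4 ∧ pvLevelLoop low (PySem.List.enumerate pvKeysB) = 4) ∨
    (pvScoreLoop low pvPriorities.items = 99 ∧ pvLevelLoop low (PySem.List.enumerate pvKeysB) = 5) := by
  simp only [pvPriorities, pvKeysB, PySem.List.enumerate_cons,
    PySem.List.enumerate_nil, pvScoreLoop, pvLevelLoop]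
  split_ifs <;> norm_num

-- for matching value/level pairs the two fibre predicates agree
theorem pvScoreIffLevel (low : String) (v j : Int)
    (hpair : (v, j) = (0, 0) ∨ (v, j) = (1, 1) ∨ (v, j) = (2, 2) ∨ (v, j) = (3, 3) ∨
             (v, j) = (4, 4) ∨ (v, j) = (99, 5)) :
    (pvScoreLoop low pvPriorities.items == v) =
      (pvLevelLoop low (PySem.List.enumerate pvKeysB) == j) := by
  rcases pvScoreLevel low with ⟨h1, h2⟩ | ⟨h1, h2⟩ | ⟨h1, h2⟩ | ⟨h1, h2⟩ | ⟨h1, h2⟩ | ⟨h1, h2⟩ <;>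
    rcases hpair with h | h | h | h | h | h <;> simp_all

-- B unfolded: one scoring pass, then fibres of the level function, each sorted by the lowered string
theorem pvAlt_eq (reasons : List String) :
    sort_blockers_py_alt reasons =
      ([0, 1, 2, 3, 4, 5] : List Int).flatMap (fun v =>
        PySem.List.sorted
          (((reasons.filter (fun item => !(PySem.Str.strip item == ""))).map
              (fun item => PySem.Str.strip item)).filter
            (fun s => pvLevelLoop (PySem.Str.lower s) (PySem.List.enumerate pvKeysB) == v))
          (fun s => PySem.Str.lower s) false) := by
  simp only [sort_blockers_py_alt, PySem.List.foldl_append_if, PySem.List.foldl_append_eq_flatMap,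
    List.nil_append]
  apply List.flatMap_congr
  intro v _
  have h1 : (reasons.filter (fun item => !(PySem.Str.strip item == ""))).map
      (fun item => (pvLevelLoop (PySem.Str.lower (PySem.Str.strip item)) (PySem.List.enumerate pvKeysB),
        PySem.Str.lower (PySem.Str.strip item), PySem.Str.strip item)) =
      ((reasons.filter (fun item => !(PySem.Str.strip item == ""))).map
          (fun item => PySem.Str.strip item)).map
        (fun s => (pvLevelLoop (PySem.Str.lower s) (PySem.List.enumerate pvKeysB),
          PySem.Str.lower s, s)) := by
    rw [List.map_map]; rfl
  rw [h1, List.filter_map, pvSorted_map, List.map_map]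
  simp only [Function.comp_def]
  simp

-- A unfolded through the partition lemma
theorem pvA_eq (reasons : List String) :
    sort_blockers_py reasons =
      ([0, 1, 2, 3, 4, 99] : List Int).flatMap (fun v =>
        PySem.List.sorted
          (((reasons.filter (fun item => !(PySem.Str.strip item == ""))).map
              (fun item => PySem.Str.strip item)).filter
            (fun s => pvScoreLoop (PySem.Str.lower s) pvPriorities.items == v))
          (fun s => PySem.Str.lower s) false) := by
  unfold sort_blockers_py
  exact pvSorted2_partition _ _ [0, 1, 2, 3, 4, 99] (by decide) _
    (fun s _ => by
      rcases pvScoreLevel (PySem.Str.lower s) with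
        ⟨h1, _⟩ | ⟨h1, _⟩ | ⟨h1, _⟩ | ⟨h1, _⟩ | ⟨h1, _⟩ | ⟨h1, _⟩ <;> simp [h1])

-- the two fibre decompositions coincide bucket by bucket
theorem pvBuckets_eq (fl : List String) :
    ([0, 1, 2, 3, 4, 99] : List Int).flatMap (fun v =>
        PySem.List.sorted
          (fl.filter (fun s => pvScoreLoop (PySem.Str.lower s) pvPriorities.items == v))
          (fun s => PySem.Str.lower s) false) =
      ([0, 1, 2, 3, 4, 5] : List Int).flatMap (fun v =>
        PySem.List.sorted
          (fl.filter (fun s => pvLevelLoop (PySem.Str.lower s) (PySem.List.enumerate pvKeysB) == v))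
          (fun s => PySem.Str.lower s) false) := by
  simp only [List.flatMap_cons, List.flatMap_nil, List.append_nil]
  rw [List.filter_congr (fun s _ => pvScoreIffLevel (PySem.Str.lower s) 0 0 (by simp)),
      List.filter_congr (fun s _ => pvScoreIffLevel (PySem.Str.lower s) 1 1 (by simp)),
      List.filter_congr (fun s _ => pvScoreIffLevel (PySem.Str.lower s) 2 2 (by simp)),
      List.filter_congr (fun s _ => pvScoreIffLevel (PySem.Str.lower s) 3 3 (by simp)),
      List.filter_congr (fun s _ => pvScoreIffLevel (PySem.Str.lower s) 4 4 (by simp)),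
      List.filter_congr (fun s _ => pvScoreIffLevel (PySem.Str.lower s) 99 5 (by simp))]

-- ===== VERDICT (by name: the statement is the Claim_ definition above) =====
theorem sort_blockers_py_spec : Claim_equal_sort_blockers_py := by
  intro reasons _
  show sort_blockers_py reasons = sort_blockers_py_alt reasons
  rw [pvA_eq, pvAlt_eq, pvBuckets_eq]
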